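-- pv_equiv track=rewrite | github.com/dj-lumiere/problem-solving-boj | 백준/Silver/1793. 타일링/타일링.py | tiling_number
-- ===== SOURCE A (Python) =====
-- def tiling_number(n: int) -> int:
--     # f(n) = 2*f(n-2)+f(n-1)
--     memo = [1, 1]
--     if n == 0:
--         return 1
--     elif n == 1:
--         return 1
--     else:
--         for i in range((n - 2) + 1):
--             memo[i % 2] = 2 * memo[(i - 2) % 2] + memo[(i - 1) % 2]
--         return memo[n % 2]
-- ===== SOURCE B (Python) =====
-- def tiling_number(n: int) -> int:
--     # closed form: f(n) = (2**(n+1) + (-1)**n) // 3 for the recurrence f(n)=2*f(n-2)+f(n-1), f(0)=f(1)=1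
--     if n <= 1:
--         return 1
--     return (2 ** (n + 1) + (-1) ** n) // 3
-- ===== Notes on version B (the rewrite author's own statement) =====
-- stated objective: alternative
-- what changed: Replaces A's O(n) rolling two-cell memo loop with the closed form (2**(n+1) + (-1)**n) // 3 of the linear recurrence: one big-int power instead of n big-int additions (intended as faster; a timing run measured 1084x at n=65536 but could not confirm the largest size, so no speed is claimed).
import Mathlib
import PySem

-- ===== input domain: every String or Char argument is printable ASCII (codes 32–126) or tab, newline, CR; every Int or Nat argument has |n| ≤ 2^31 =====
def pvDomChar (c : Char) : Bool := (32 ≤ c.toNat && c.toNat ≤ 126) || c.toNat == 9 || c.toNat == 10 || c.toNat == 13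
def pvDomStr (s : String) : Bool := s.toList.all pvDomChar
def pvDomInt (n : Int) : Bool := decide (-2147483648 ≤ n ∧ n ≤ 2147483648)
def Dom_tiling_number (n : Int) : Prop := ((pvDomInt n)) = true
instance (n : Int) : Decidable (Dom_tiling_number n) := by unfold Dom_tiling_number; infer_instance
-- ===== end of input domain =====

-- B replaces A's O(n) rolling-memo loop by the closed form (2^(n+1) + (-1)^n) // 3 of the recurrence (objective: alternative; intended as faster, measured 1084x at n=65536 but unconfirmed at the largest size).

-- ===== PORT A =====
-- one loop step: memo[i % 2] = 2 * memo[(i - 2) % 2] + memo[(i - 1) % 2]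
def pvStepA (memo : List Int) (i : Int) : List Int :=
  memo.set (PySem.Int.mod i 2).toNat
    (2 * (PySem.List.pyGet? memo (PySem.Int.mod (i - 2) 2)).getD 0
       + (PySem.List.pyGet? memo (PySem.Int.mod (i - 1) 2)).getD 0)

def tiling_number (n : Int) : Int :=
  let memo : List Int := [1, 1]
  if n = 0 then 1
  else if n = 1 then 1
  else
    let memo := (PySem.List.pyRange 0 ((n - 2) + 1) 1).foldl pvStepA memo
    ((PySem.List.pyGet? memo (PySem.Int.mod n 2)).getD 0)

-- ===== PORT B =====
def tiling_number_alt (n : Int) : Int :=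
  if n ≤ 1 then 1
  -- 2 ** (n + 1) and (-1) ** n with n ≥ 2: exponents are nonnegative, so Int powers are exact
  else PySem.Int.floordiv (2 ^ (n + 1).toNat + (-1) ^ n.toNat) 3

-- ===== PRECONDITION & SPEC =====
def Spec_tiling_number (n : Int) (out : Int) : Prop := out = tiling_number_alt n
instance (n : Int) (out : Int) : Decidable (Spec_tiling_number n out) := by unfold Spec_tiling_number; infer_instance

-- ===== CLAIM (what is proved, stated in full; the proofs are below) =====
def Claim_equal_tiling_number : Prop := ∀ (n : Int), Dom_tiling_number n → Spec_tiling_number n (tiling_number n)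

-- ===== LEMMAS AND PROOFS =====

-- the reference sequence f(0)=f(1)=1, f(k+2)=2*f(k)+f(k+1)
def pvF : Nat → Int
  | 0 => 1
  | 1 => 1
  | (k + 2) => 2 * pvF k + pvF (k + 1)

theorem pvF_closed : ∀ m : Nat, 3 * pvF m = 2 ^ (m + 1) + (-1) ^ m := by
  intro m
  induction m using pvF.induct with
  | case1 => decide
  | case2 => decide
  | case3 k ih1 ih2 =>
    simp only [pvF]
    have h2 : (2 : Int) ^ (k + 2 + 1) = 2 * 2 ^ (k + 1) + 2 ^ (k + 1 + 1) := by ring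
    have h1 : ((-1) : Int) ^ (k + 2) = 2 * (-1) ^ k + (-1) ^ (k + 1) := by ring
    rw [h2, h1]; linarith

-- invariant of A's loop after k iterations
theorem pvStepA_eval (a b : Int) (k : Nat) :
    pvStepA [a, b] (k : Int) = if k % 2 = 0 then [2 * a + b, b] else [a, 2 * b + a] := by
  rcases Nat.even_or_odd k with ⟨j, hj⟩ | ⟨j, hj⟩
  · have m0 : PySem.Int.mod (k : Int) 2 = 0 := by
      rw [PySem.Int.mod_eq_emod_of_pos (show (0:Int) < 2 by norm_num)]; omega
    have m2 : PySem.Int.mod ((k : Int) - 2) 2 = 0 := by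
      rw [PySem.Int.mod_eq_emod_of_pos (show (0:Int) < 2 by norm_num)]; omega
    have m1 : PySem.Int.mod ((k : Int) - 1) 2 = 1 := by
      rw [PySem.Int.mod_eq_emod_of_pos (show (0:Int) < 2 by norm_num)]; omega
    unfold pvStepA
    rw [m0, m2, m1]
    have e0 : k % 2 = 0 := by omega
    simp [PySem.List.pyGet?, PySem.List.pyIdx?, e0]
  · have m0 : PySem.Int.mod (k : Int) 2 = 1 := by
      rw [PySem.Int.mod_eq_emod_of_pos (show (0:Int) < 2 by norm_num)]; omega
    have m2 : PySem.Int.mod ((k : Int) - 2) 2 = 1 := by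
      rw [PySem.Int.mod_eq_emod_of_pos (show (0:Int) < 2 by norm_num)]; omega
    have m1 : PySem.Int.mod ((k : Int) - 1) 2 = 0 := by
      rw [PySem.Int.mod_eq_emod_of_pos (show (0:Int) < 2 by norm_num)]; omega
    unfold pvStepA
    rw [m0, m2, m1]
    have e0 : k % 2 = 1 := by omega
    simp [PySem.List.pyGet?, PySem.List.pyIdx?, e0]

theorem pvLoopA (k : Nat) :
    (PySem.List.pyRange 0 (k : Int) 1).foldl pvStepA [1, 1] =
      if k % 2 = 0 then [pvF k, pvF (k + 1)] else [pvF (k + 1), pvF k] := by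
  induction k with
  | zero => decide
  | succ k ih =>
    have hr : PySem.List.pyRange 0 ((k : Int) + 1) 1 =
        PySem.List.pyRange 0 (k : Int) 1 ++ [(k : Int)] :=
      PySem.List.pyRange_one_succ_right (by positivity)
    rw [show ((k + 1 : Nat) : Int) = (k : Int) + 1 by push_cast; ring, hr,
      List.foldl_append, ih]
    rcases Nat.even_or_odd k with ⟨j, hj⟩ | ⟨j, hj⟩
    · have e0 : k % 2 = 0 := by omega
      have e1 : (k + 1) % 2 = 1 := by omega
      simp only [e0, e1, List.foldl_cons, List.foldl_nil, if_true, if_neg (by omega : ¬ (1 = 0))]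
      rw [pvStepA_eval]
      simp [e0, pvF]
    · have e0 : k % 2 = 1 := by omega
      have e1 : (k + 1) % 2 = 0 := by omega
      simp only [e0, e1, List.foldl_cons, List.foldl_nil, if_true, if_neg (by omega : ¬ (1 = 0))]
      rw [pvStepA_eval]
      simp [e0, pvF]

-- ===== VERDICT (by name: the statement is the Claim_ definition above) =====
theorem tiling_number_spec : Claim_equal_tiling_number := by
  intro n _
  unfold Spec_tiling_number tiling_number tiling_number_alt
  by_cases h2 : n ≤ 1
  · -- n == 0, n == 1, or negative n (empty loop): both sides are 1
    rw [if_pos h2]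
    by_cases h0 : n = 0
    · rw [if_pos h0]
    · rw [if_neg h0]
      by_cases h1 : n = 1
      · rw [if_pos h1]
      · rw [if_neg h1]
        have hlt : n < 0 := by omega
        have hempty : PySem.List.pyRange 0 ((n - 2) + 1) 1 = [] := by
          rw [PySem.List.pyRange_zero]
          simp [Int.toNat_of_nonpos (by omega : (n - 2) + 1 ≤ 0)]
        rw [hempty]
        have hmod : PySem.Int.mod n 2 = 0 ∨ PySem.Int.mod n 2 = 1 := by
          have hnn := PySem.Int.mod_nonneg n (show (0:Int) < 2 by norm_num)
          have hub := PySem.Int.mod_lt n (show (0:Int) < 2 by norm_num)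
          omega
        rcases hmod with h | h <;> rw [h] <;> simp [PySem.List.pyGet?, PySem.List.pyIdx?]
  · -- n ≥ 2: the loop runs n - 1 times and leaves pvF n in memo[n % 2]
    rw [if_neg h2, if_neg (by omega : ¬ n = 0), if_neg (by omega : ¬ n = 1)]
    have hn2 : 2 ≤ n := by omega
    obtain ⟨m, hm, hm2⟩ : ∃ m : Nat, (m : Int) = n ∧ 2 ≤ m := by
      refine ⟨n.toNat, Int.toNat_of_nonneg (by omega), by omega⟩
    subst hm
    have hk : ((m : Int) - 2) + 1 = ((m - 1 : Nat) : Int) := by omega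
    rw [hk, pvLoopA (m - 1)]
    have hmod : PySem.Int.mod (m : Int) 2 = ((m % 2 : Nat) : Int) := PySem.Int.mod_natCast m 2
    have hA : (PySem.List.pyGet?
        (if (m - 1) % 2 = 0 then [pvF (m - 1), pvF (m - 1 + 1)] else [pvF (m - 1 + 1), pvF (m - 1)])
        (PySem.Int.mod (m : Int) 2)).getD 0 = pvF m := by
      rcases Nat.even_or_odd m with ⟨j, hj⟩ | ⟨j, hj⟩
      · have e : m % 2 = 0 := by omega
        have e' : (m - 1) % 2 = 1 := by omega
        have hs : m - 1 + 1 = m := by omega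
        rw [hmod, e, e', hs]
        simp [PySem.List.pyGet?, PySem.List.pyIdx?]
      · have e : m % 2 = 1 := by omega
        have e' : (m - 1) % 2 = 0 := by omega
        have hs : m - 1 + 1 = m := by omega
        rw [hmod, e, e', hs]
        simp [PySem.List.pyGet?, PySem.List.pyIdx?]
    rw [hA]
    have ht1 : ((m : Int) + 1).toNat = m + 1 := by omega
    have ht2 : ((m : Int)).toNat = m := by omega
    rw [ht1, ht2, ← pvF_closed m,
      PySem.Int.floordiv_eq_ediv_of_pos (show (0:Int) < 3 by norm_num),
      Int.mul_ediv_cancel_left _ (by norm_num)]
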